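-- pv_equiv track=rewrite | github.com/eliottcassidy2000/math | 04-computation/paley_vs_interval_race.py | additive_energy
-- ===== SOURCE A (Python) =====
-- def additive_energy(S, p):
--     """E(S) = |{(a,b,c,d) ∈ S^4 : a+b ≡ c+d mod p}|"""
--     count = 0
--     sums = {}
--     for a in S:
--         for b in S:
--             s = (a + b) % p
--             sums[s] = sums.get(s, 0) + 1
--     for v in sums.values():
--         count += v * v
--     return count
-- ===== SOURCE B (Python) =====
-- def additive_energy(S, p):
--     """E(S) = |{(a,b,c,d) in S^4 : a+b = c+d mod p}| via residue-class reduction: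
--     count each residue class once, then convolve the (distinct residue, multiplicity)
--     pairs instead of looping over all |S|^2 element pairs."""
--     r = {}
--     for a in S:
--         x = a % p
--         r[x] = r.get(x, 0) + 1
--     conv = {}
--     for x, cx in r.items():
--         for y, cy in r.items():
--             t = (x + y) % p
--             conv[t] = conv.get(t, 0) + cx * cy
--     total = 0
--     for v in conv.values():
--         total += v * v
--     return total
-- ===== Notes on version B (the rewrite author's own statement) =====
-- stated objective: faster
-- what changed: B first collapses S to a counter of residues mod p in one pass, then convolves the k distinct residues with multiplicities instead of iterating over all |S|^2 element pairs, so the quadratic work is over distinct residues (k <= min(|S|,|p|)) rather than elements.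
import Mathlib
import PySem

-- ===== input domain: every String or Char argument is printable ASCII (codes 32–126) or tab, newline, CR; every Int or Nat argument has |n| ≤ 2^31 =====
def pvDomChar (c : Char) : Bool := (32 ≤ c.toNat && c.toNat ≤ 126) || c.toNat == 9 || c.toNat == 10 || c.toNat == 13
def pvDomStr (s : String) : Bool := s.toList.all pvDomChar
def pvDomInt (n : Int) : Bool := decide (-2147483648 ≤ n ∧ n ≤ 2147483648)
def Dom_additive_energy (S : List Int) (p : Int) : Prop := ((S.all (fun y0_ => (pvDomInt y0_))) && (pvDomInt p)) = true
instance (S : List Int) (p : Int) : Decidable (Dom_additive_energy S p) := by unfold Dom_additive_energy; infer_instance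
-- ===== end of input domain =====

-- B replaces A's loop over all |S|^2 element pairs by a one-pass residue counter followed by a
-- convolution of the distinct residues with multiplicities (measured faster in a timing run).


-- ===== PORT A =====
def additive_energy (S : List Int) (p : Int) : Int :=
  let sums := S.foldl (fun d a =>
    S.foldl (fun d b =>
      d.insert (PySem.Int.mod (a + b) p) (d.getD (PySem.Int.mod (a + b) p) 0 + 1)) d)
    PySem.Dict.empty
  sums.values.foldl (fun count v => count + v * v) 0

-- ===== PORT B =====
def additive_energy_alt (S : List Int) (p : Int) : Int :=
  let r := S.foldl (fun d a =>
    d.insert (PySem.Int.mod a p) (d.getD (PySem.Int.mod a p) 0 + 1)) PySem.Dict.empty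
  let conv := r.items.foldl (fun c xc =>
    r.items.foldl (fun c yc =>
      c.insert (PySem.Int.mod (xc.1 + yc.1) p) (c.getD (PySem.Int.mod (xc.1 + yc.1) p) 0 + xc.2 * yc.2)) c)
    PySem.Dict.empty
  conv.values.foldl (fun total v => total + v * v) 0

-- ===== PRECONDITION & SPEC =====
-- Pre_ excludes exactly the inputs where Python raises: '%' with p = 0 is a ZeroDivisionError,
-- reached as soon as S is nonempty (both A and B raise there).
def Pre_additive_energy (S : List Int) (p : Int) : Prop := S = [] ∨ p ≠ 0
instance (S : List Int) (p : Int) : Decidable (Pre_additive_energy S p) := by unfold Pre_additive_energy; infer_instance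
def pvWitness_additive_energy : List Int × Int := ([1, 2, 6], 5)
def Spec_additive_energy (S : List Int) (p : Int) (out : Int) : Prop := out = additive_energy_alt S p
instance (S : List Int) (p : Int) (out : Int) : Decidable (Spec_additive_energy S p out) := by unfold Spec_additive_energy; infer_instance

-- ===== CLAIM (what is proved, stated in full; the proofs are below) =====
def Claim_equal_additive_energy : Prop := ∀ (S : List Int) (p : Int), Dom_additive_energy S p → Pre_additive_energy S p → Spec_additive_energy S p (additive_energy S p)

-- ===== LEMMAS AND PROOFS =====

-- L0
theorem pv_mod_add (a b p : Int) : PySem.Int.mod (PySem.Int.mod a p + PySem.Int.mod b p) p = PySem.Int.mod (a + b) p := by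
  simp [PySem.Int.mod]

-- L1 indicator
theorem pv_sum_ite_single (g : Int → Int) (a : Int) :
    ∀ (l : List Int), l.Nodup → a ∈ l → (l.map (fun x => if x = a then g x else 0)).sum = g a := by
  intro l hnd hmem
  induction l with
  | nil => cases hmem
  | cons x t ih =>
    simp only [List.map_cons, List.sum_cons]
    rcases List.mem_cons.1 hmem with h | h
    · subst h
      have : (t.map (fun x => if x = a then g x else 0)).sum = 0 := by
        apply List.sum_eq_zero
        intro y hy
        rcases List.mem_map.1 hy with ⟨z, hz, rfl⟩
        have : z ≠ a := fun e => (List.nodup_cons.1 hnd).1 (e ▸ hz)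
        simp [this]
      simp [this]
    · have hxa : x ≠ a := fun e => (List.nodup_cons.1 hnd).1 (e ▸ h)
      rw [if_neg hxa, ih (List.nodup_cons.1 hnd).2 h]
      ring

-- L2 group by dedup
theorem pv_sum_map_eq_dedup (g : Int → Int) :
    ∀ (m : List Int), (m.map g).sum = (m.dedup.map (fun x => (m.count x : Int) * g x)).sum := by
  intro m
  induction m with
  | nil => simp
  | cons a t ih =>
    have hcnt : ∀ x, ((a :: t).count x : Int) * g x
        = (t.count x : Int) * g x + (if x = a then g x else 0) := by
      intro x
      by_cases h : a = x
      · subst h; simp; ring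
      · have : x ≠ a := fun e => h e.symm
        simp [h, this]
    by_cases hmem : a ∈ t
    · rw [List.dedup_cons_of_mem hmem]
      calc ((a :: t).map g).sum = g a + (t.map g).sum := by simp
        _ = g a + (t.dedup.map (fun x => (t.count x : Int) * g x)).sum := by rw [ih]
        _ = (t.dedup.map (fun x => ((a :: t).count x : Int) * g x)).sum := by
              simp only [hcnt, List.sum_map_add]
              rw [pv_sum_ite_single g a t.dedup (List.nodup_dedup t) (List.mem_dedup.2 hmem)]
              ring
    · rw [List.dedup_cons_of_notMem hmem]
      simp only [List.map_cons, List.sum_cons]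
      have ha : ((a :: t).count a : Int) = (t.count a : Int) + 1 := by
        simp
      have ht : (t.dedup.map (fun x => ((a :: t).count x : Int) * g x)).sum
          = (t.dedup.map (fun x => (t.count x : Int) * g x)).sum := by
        apply congrArg List.sum
        apply List.map_congr_left
        intro x hx
        have hxa : x ≠ a := fun e => hmem (e ▸ List.mem_dedup.1 hx)
        rw [hcnt x, if_neg hxa, add_zero]
      have hz : t.count a = 0 := List.count_eq_zero.2 hmem
      rw [ht, ih, ha, hz]
      push_cast
      ring

-- L3 transfer between nodup lists with equal members
theorem pv_sum_nodup_congr (f : Int → Int) (l₁ l₂ : List Int)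
    (h₁ : l₁.Nodup) (h₂ : l₂.Nodup) (hm : ∀ x, x ∈ l₁ ↔ x ∈ l₂) :
    (l₁.map f).sum = (l₂.map f).sum :=
  (((List.perm_ext_iff_of_nodup h₁ h₂).2 hm).map f).sum_eq

-- L4 group by PySem dedup (Set.ofList)
theorem pv_sum_map_eq_ofList (g : Int → Int) (m : List Int) :
    (m.map g).sum = ((PySem.Set.ofList m).map (fun x => (m.count x : Int) * g x)).sum := by
  rw [pv_sum_map_eq_dedup]
  exact pv_sum_nodup_congr _ _ _ (List.nodup_dedup m) (PySem.Set.nodup_ofList m)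
    (fun x => by rw [List.mem_dedup, PySem.Set.mem_ofList])

-- L5 weighted fold getD
theorem pv_getD_wfold (t : Int) :
    ∀ (ps : List (Int × Int)) (d : PySem.Dict Int Int),
    (ps.foldl (fun c q => c.insert q.1 (c.getD q.1 0 + q.2)) d).getD t 0
      = d.getD t 0 + ((ps.filter (fun q => q.1 == t)).map (·.2)).sum := by
  intro ps
  induction ps with
  | nil => simp
  | cons q ps ih =>
    intro d
    simp only [List.foldl_cons, ih, List.filter_cons]
    by_cases h : q.1 = t
    · simp only [PySem.Dict.getD_insert, h]
      simp [h]
      ring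
    · simp only [PySem.Dict.getD_insert]
      rw [if_neg (fun e => h e.symm)]
      simp [h]

-- L6 filter-map sum as ite sum
theorem pv_sum_filter_map {α : Type} (pr : α → Bool) (g : α → Int) :
    ∀ (l : List α), ((l.filter pr).map g).sum = (l.map (fun e => if pr e then g e else 0)).sum := by
  intro l
  induction l with
  | nil => rfl
  | cons x t ih =>
    by_cases h : pr x
    · simp [h, ih]
    · simp [h, ih]

def pvL (S : List Int) (p : Int) : List Int := S.flatMap (fun a => S.map (fun b => PySem.Int.mod (a + b) p))
def pvR (S : List Int) (p : Int) : List Int := S.map (fun a => PySem.Int.mod a p)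
def pvItems (S : List Int) (p : Int) : List (Int × Int) :=
  (PySem.Set.ofList (pvR S p)).map (fun k => (k, ((pvR S p).count k : Int)))
def pvP (S : List Int) (p : Int) : List (Int × Int) :=
  (pvItems S p).flatMap (fun xc => (pvItems S p).map (fun yc => (PySem.Int.mod (xc.1 + yc.1) p, xc.2 * yc.2)))
def pvW (S : List Int) (p : Int) (t : Int) : Int :=
  (((pvP S p).filter (fun q => q.1 == t)).map (·.2)).sum

theorem pv_A_eq (S : List Int) (p : Int) :
    additive_energy S p
      = ((PySem.Set.ofList (pvL S p)).map (fun k => ((pvL S p).count k : Int) * ((pvL S p).count k : Int))).sum := by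
  have hd : S.foldl (fun d a => S.foldl (fun d b =>
        d.insert (PySem.Int.mod (a + b) p) (d.getD (PySem.Int.mod (a + b) p) 0 + 1)) d)
        PySem.Dict.empty = PySem.Dict.counter (pvL S p) := by
    rw [← PySem.Dict.foldl_insert_getD_add_one_eq_counter, pvL, List.foldl_flatMap]
    simp only [List.foldl_map]
  show (S.foldl _ PySem.Dict.empty).values.foldl (fun count v => count + v * v) 0 = _
  rw [hd, PySem.Dict.values_eq_map_keys _ (PySem.Dict.nodup_keys_counter _) 0,
      PySem.Dict.keys_counter, PySem.List.foldl_add _ (fun v => v * v) 0]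
  simp only [List.map_map, Function.comp_def, PySem.Dict.getD_counter, zero_add]

theorem pv_B_eq (S : List Int) (p : Int) :
    additive_energy_alt S p
      = ((PySem.Set.ofList ((pvP S p).map Prod.fst)).map (fun t => pvW S p t * pvW S p t)).sum := by
  have hr : S.foldl (fun d a =>
      d.insert (PySem.Int.mod a p) (d.getD (PySem.Int.mod a p) 0 + 1)) PySem.Dict.empty
      = PySem.Dict.counter (pvR S p) := by
    rw [← PySem.Dict.foldl_insert_getD_add_one_eq_counter, pvR, List.foldl_map]
  have hitems : (PySem.Dict.counter (pvR S p)).items = pvItems S p := PySem.Dict.items_counter _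
  have hconv : (pvItems S p).foldl (fun c xc => (pvItems S p).foldl (fun c yc =>
        c.insert (PySem.Int.mod (xc.1 + yc.1) p)
          (c.getD (PySem.Int.mod (xc.1 + yc.1) p) 0 + xc.2 * yc.2)) c) PySem.Dict.empty
      = (pvP S p).foldl (fun c q => c.insert q.1 (c.getD q.1 0 + q.2)) PySem.Dict.empty := by
    rw [pvP, List.foldl_flatMap]
    simp only [List.foldl_map]
  show ((S.foldl _ PySem.Dict.empty).items.foldl _ PySem.Dict.empty).values.foldl
      (fun total v => total + v * v) 0 = _
  rw [hr, hitems, hconv]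
  have hnd : ((pvP S p).foldl (fun c q => c.insert q.1 (c.getD q.1 0 + q.2))
      (PySem.Dict.empty : PySem.Dict Int Int)).keys.Nodup :=
    PySem.Dict.nodup_keys_foldl_insert_key _ Prod.fst (fun c q => c.getD q.1 0 + q.2) _
      PySem.Dict.nodup_keys_empty
  have hkeys : ((pvP S p).foldl (fun c q => c.insert q.1 (c.getD q.1 0 + q.2))
      (PySem.Dict.empty : PySem.Dict Int Int)).keys = PySem.Set.ofList ((pvP S p).map Prod.fst) := by
    rw [PySem.Dict.keys_foldl_insert_key _ Prod.fst (fun c q => c.getD q.1 0 + q.2), PySem.Dict.keys_empty]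
    exact PySem.Set.update_empty _
  rw [PySem.Dict.values_eq_map_keys _ hnd 0, hkeys, PySem.List.foldl_add _ (fun v => v * v) 0]
  simp only [List.map_map, Function.comp_def, pv_getD_wfold, PySem.Dict.getD_empty, zero_add]
  rfl

theorem pv_sum_flatMap {α : Type} (f : α → List Int) :
    ∀ (l : List α), (l.flatMap f).sum = (l.map (fun a => (f a).sum)).sum := by
  intro l
  induction l with
  | nil => rfl
  | cons x t ih => simp [List.flatMap_cons, ih]


def pvK (S : List Int) (p : Int) : List Int := PySem.Set.ofList (pvR S p)
def pvC (S : List Int) (p : Int) (x : Int) : Int := ((pvR S p).count x : Int)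
def pvI (p t z w : Int) : Int := if PySem.Int.mod (z + w) p == t then 1 else 0
def pvH (S : List Int) (p t z : Int) : Int := (S.map (fun y => pvI p t z (PySem.Int.mod y p))).sum

theorem pv_inner (S : List Int) (p t z : Int) :
    pvH S p t z = ((pvK S p).map (fun w => pvC S p w * pvI p t z w)).sum := by
  rw [pvH, show (fun y => pvI p t z (PySem.Int.mod y p))
      = (pvI p t z) ∘ (fun y => PySem.Int.mod y p) from rfl, ← List.map_map, ← pvR,
    pv_sum_map_eq_ofList, ← pvK]
  simp only [pvC]

theorem pv_count_grouped (S : List Int) (p t : Int) :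
    (S.map (fun x => (S.map (fun y =>
        if (PySem.Int.mod (x + y) p == t) = true then (1 : Int) else 0)).sum)).sum
      = ((pvK S p).map (fun z => pvC S p z
          * ((pvK S p).map (fun w => pvC S p w * pvI p t z w)).sum)).sum := by
  have h0 : (fun x => (S.map (fun y =>
      if (PySem.Int.mod (x + y) p == t) = true then (1 : Int) else 0)).sum)
      = fun x => pvH S p t (PySem.Int.mod x p) := by
    funext x
    rw [pvH]
    simp only [pvI, pv_mod_add]
  rw [h0, show (fun x => pvH S p t (PySem.Int.mod x p))
      = (pvH S p t) ∘ (fun x => PySem.Int.mod x p) from rfl, ← List.map_map, ← pvR,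
    pv_sum_map_eq_ofList, ← pvK]
  simp only [pv_inner, pvC]

theorem pv_W_eq_count (S : List Int) (p : Int) (t : Int) :
    pvW S p t = ((pvL S p).count t : Int) := by
  -- LHS: sum over the convolution pair list, as a double sum over distinct residues
  rw [pvW, pv_sum_filter_map, pvP, List.map_flatMap, pv_sum_flatMap]
  simp only [List.map_map, Function.comp_def]
  -- RHS: count over the flatMap of all element pairs, as a double 0/1 sum
  rw [pvL, List.count_flatMap]
  rw [Nat.cast_list_sum]
  simp only [List.map_map, Function.comp_def, List.count_eq_countP, List.countP_map,
    Function.comp_def]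
  simp only [← PySem.List.sum_map_ite_one_zero (fun b => PySem.Int.mod _ p == t) S]
  rw [pv_count_grouped]
  simp only [pvItems, List.map_map, Function.comp_def, pvC, pvI, pvK]
  simp only [mul_ite, mul_one, mul_zero]
  simp only [← List.sum_map_mul_left, mul_ite, mul_zero]

theorem pv_mem_iff (S : List Int) (p t : Int) :
    t ∈ (pvP S p).map Prod.fst ↔ t ∈ pvL S p := by
  simp only [pvP, pvItems, pvL, pvR, List.mem_map, List.mem_flatMap, PySem.Set.mem_ofList]
  constructor
  · rintro ⟨q, ⟨xc, ⟨x, ⟨a, ha, rfl⟩, rfl⟩, yc, ⟨y, ⟨b, hb, rfl⟩, rfl⟩, rfl⟩, rfl⟩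
    exact ⟨a, ha, ⟨b, hb, (pv_mod_add a b p).symm⟩⟩
  · rintro ⟨a, ha, b, hb, rfl⟩
    refine ⟨(PySem.Int.mod (a + b) p,
        ((S.map (fun a => PySem.Int.mod a p)).count (PySem.Int.mod a p) : Int)
          * ((S.map (fun a => PySem.Int.mod a p)).count (PySem.Int.mod b p) : Int)),
      ⟨(PySem.Int.mod a p, ((S.map (fun a => PySem.Int.mod a p)).count (PySem.Int.mod a p) : Int)),
        ⟨PySem.Int.mod a p, ⟨a, ha, rfl⟩, rfl⟩,
      (PySem.Int.mod b p, ((S.map (fun a => PySem.Int.mod a p)).count (PySem.Int.mod b p) : Int)),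
        ⟨PySem.Int.mod b p, ⟨b, hb, rfl⟩, rfl⟩, ?_⟩, rfl⟩
    rw [pv_mod_add]

theorem additive_energy_spec_aux (S : List Int) (p : Int) :
    additive_energy S p = additive_energy_alt S p := by
  rw [pv_A_eq, pv_B_eq]
  simp only [pv_W_eq_count]
  exact (pv_sum_nodup_congr _ _ _ (PySem.Set.nodup_ofList _) (PySem.Set.nodup_ofList _)
    (fun x => by rw [PySem.Set.mem_ofList, PySem.Set.mem_ofList, pv_mem_iff])).symm

-- ===== VERDICT (by name: the statement is the Claim_ definition above) =====
theorem additive_energy_spec : Claim_equal_additive_energy := by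
  intro S p _ _
  unfold Spec_additive_energy
  exact additive_energy_spec_aux S p
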